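-- pv_equiv track=rewrite | github.com/Thomas-D40/video-analyzer-workflow | app/utils/mcp_client.py | format_articles_context
-- ===== SOURCE A (Python) =====
-- from typing import List, Dict, Optional
--
-- def format_articles_context(articles: List[Dict], max_length: int = 5000) -> str:
--     """
--     Formate les articles en contexte optimisé pour les prompts.
--
--     Args:
--         articles: Liste des articles
--         max_length: Longueur maximale du contexte
--
--     Returns:
--         Texte formaté optimisé
--     """
--     if not articles:
--         return ""
--
--     formatted = []
--     current_length = 0
--
--     for article in articles:
--         article_text = f"Article: {article.get('title', '')}\nURL: {article.get('url', '')}\nRésumé: {article.get('summary', '')}\n\n"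
--
--         if current_length + len(article_text) > max_length:
--             break
--
--         formatted.append(article_text)
--         current_length += len(article_text)
--
--     result = "".join(formatted)
--
--     if len(articles) > len(formatted):
--         result += f"\n[Note: {len(articles) - len(formatted)} article(s) supplémentaire(s) disponible(s)]"
--
--     return result
-- ===== SOURCE B (Python) =====
-- from typing import List, Dict
--
-- def _render(arts: List[Dict], budget: int) -> str:
--     """Recursively render articles while they fit in the remaining budget;
--     at the stopping point emit the note about the remaining articles."""
--     if not arts:
--         return ""
--     text = f"Article: {arts[0].get('title', '')}\nURL: {arts[0].get('url', '')}\nRésumé: {arts[0].get('summary', '')}\n\n"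
--     if len(text) > budget:
--         return f"\n[Note: {len(arts)} article(s) supplémentaire(s) disponible(s)]"
--     return text + _render(arts[1:], budget - len(text))
--
-- def format_articles_context(articles: List[Dict], max_length: int = 5000) -> str:
--     if not articles:
--         return ""
--     return _render(articles, max_length)
-- ===== Notes on version B (the rewrite author's own statement) =====
-- stated objective: alternative
-- what changed: Replaces A's loop (running total, break, accumulator list, join, post-hoc note from a length comparison) with a recursive function that threads the remaining budget down the recursion, concatenates head-first, and emits the note at the stopping point from the length of the unprocessed tail; no running total, no intermediate list, no join.
import Mathlib
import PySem

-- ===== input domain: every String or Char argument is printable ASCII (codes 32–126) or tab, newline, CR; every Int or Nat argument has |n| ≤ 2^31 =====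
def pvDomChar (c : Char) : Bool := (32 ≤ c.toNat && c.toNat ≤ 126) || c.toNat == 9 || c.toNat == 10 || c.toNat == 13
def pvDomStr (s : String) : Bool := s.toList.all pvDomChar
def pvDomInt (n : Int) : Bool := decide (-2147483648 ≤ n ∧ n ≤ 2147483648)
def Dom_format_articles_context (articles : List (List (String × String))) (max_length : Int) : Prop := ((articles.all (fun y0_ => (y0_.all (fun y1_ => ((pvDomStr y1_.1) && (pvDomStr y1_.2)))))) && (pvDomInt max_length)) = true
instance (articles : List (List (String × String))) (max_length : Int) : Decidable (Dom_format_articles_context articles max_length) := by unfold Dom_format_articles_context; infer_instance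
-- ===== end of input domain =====

-- B replaces A's running-total loop + join + post-hoc note with a recursion threading the remaining budget (alternative structure, same cost).

-- ===== PORT A =====
-- the f-string A builds per article
def pvFmtA (a : List (String × String)) : String :=
  "Article: " ++ PySem.Dict.getD (PySem.Dict.mk a) "title" "" ++
  "\nURL: " ++ PySem.Dict.getD (PySem.Dict.mk a) "url" "" ++
  "\nRésumé: " ++ PySem.Dict.getD (PySem.Dict.mk a) "summary" "" ++ "\n\n"

-- A's for-loop with break, state = (current_length, formatted)
def pvLoopA (ml : Int) : List (List (String × String)) → Int → List String → List String
  | [], _, formatted => formatted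
  | a :: rest, cl, formatted =>
      let t := pvFmtA a
      if cl + PySem.Str.len t > ml then formatted
      else pvLoopA ml rest (cl + PySem.Str.len t) (formatted ++ [t])

def format_articles_context (articles : List (List (String × String))) (max_length : Int) : String :=
  if articles = [] then ""
  else
    let formatted := pvLoopA max_length articles 0 []
    let result := PySem.Str.join "" formatted
    if PySem.List.len articles > PySem.List.len formatted then
      result ++ ("\n[Note: " ++ PySem.Int.toStr (PySem.List.len articles - PySem.List.len formatted) ++ " article(s) supplémentaire(s) disponible(s)]")
    else result

-- ===== PORT B =====
-- the f-string Source B's _render builds for the head article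
def pvFmtB (a : List (String × String)) : String :=
  "Article: " ++ PySem.Dict.getD (PySem.Dict.mk a) "title" "" ++
  "\nURL: " ++ PySem.Dict.getD (PySem.Dict.mk a) "url" "" ++
  "\nRésumé: " ++ PySem.Dict.getD (PySem.Dict.mk a) "summary" "" ++ "\n\n"

-- Source B's _render: recursion on the list, threading the remaining budget
def pvRender : List (List (String × String)) → Int → String
  | [], _ => ""
  | a :: rest, budget =>
      let text := pvFmtB a
      if PySem.Str.len text > budget then
        "\n[Note: " ++ PySem.Int.toStr (PySem.List.len (a :: rest)) ++ " article(s) supplémentaire(s) disponible(s)]"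
      else text ++ pvRender rest (budget - PySem.Str.len text)

def format_articles_context_alt (articles : List (List (String × String))) (max_length : Int) : String :=
  if articles = [] then ""
  else pvRender articles max_length

-- ===== PRECONDITION & SPEC =====
def Spec_format_articles_context (articles : List (List (String × String))) (max_length : Int) (out : String) : Prop := out = format_articles_context_alt articles max_length
instance (articles : List (List (String × String))) (max_length : Int) (out : String) : Decidable (Spec_format_articles_context articles max_length out) := by unfold Spec_format_articles_context; infer_instance

-- ===== CLAIM (what is proved, stated in full; the proofs are below) =====
def Claim_equal_format_articles_context : Prop := ∀ (articles : List (List (String × String))) (max_length : Int), Dom_format_articles_context articles max_length → Spec_format_articles_context articles max_length (format_articles_context articles max_length)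

-- ===== LEMMAS AND PROOFS =====

-- A's optional trailing note, as a function of the full list and the kept prefix (proof-only helper)
def pvNote (l : List (List (String × String))) (fm : List String) : String :=
  if PySem.List.len l > PySem.List.len fm then
    "\n[Note: " ++ PySem.Int.toStr (PySem.List.len l - PySem.List.len fm) ++ " article(s) supplémentaire(s) disponible(s)]"
  else ""

theorem pvNote_cons (a : List (String × String)) (l : List (List (String × String))) (t : String) (fm : List String) :
    pvNote (a :: l) (t :: fm) = pvNote l fm := by
  simp only [pvNote, PySem.List.len_eq, List.length_cons]
  by_cases h : (l.length : Int) > fm.length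
  · have h1 : ((l.length + 1 : Nat) : Int) > ((fm.length + 1 : Nat) : Int) := by push_cast; omega
    rw [if_pos h1, if_pos h]
    have : ((l.length + 1 : Nat) : Int) - ((fm.length + 1 : Nat) : Int) = (l.length : Int) - fm.length := by
      push_cast; ring
    rw [this]
  · have h1 : ¬ ((l.length + 1 : Nat) : Int) > ((fm.length + 1 : Nat) : Int) := by push_cast; omega
    rw [if_neg h1, if_neg h]

theorem pvJoinCons (t : String) (l : List String) :
    PySem.Str.join "" (t :: l) = t ++ PySem.Str.join "" l := by
  cases l with
  | nil => simp [PySem.Str.join, PySem.Chars.join, List.intercalate]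
  | cons x xs => simp [PySem.Str.join, PySem.Chars.join_cons_cons]

theorem pvJoinNil : PySem.Str.join "" ([] : List String) = "" := by
  simp [PySem.Str.join, PySem.Chars.join, List.intercalate]

-- accumulator lemma for A's loop
theorem pvLoopA_acc (ml : Int) (l : List (List (String × String))) (cl : Int) (fm : List String) :
    pvLoopA ml l cl fm = fm ++ pvLoopA ml l cl [] := by
  induction l generalizing cl fm with
  | nil => simp [pvLoopA]
  | cons a rest ih =>
    simp only [pvLoopA]
    split_ifs with h
    · simp
    · rw [ih (cl + PySem.Str.len (pvFmtA a)) (fm ++ [pvFmtA a]),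
          ih (cl + PySem.Str.len (pvFmtA a)) ([] ++ [pvFmtA a])]
      simp

-- A's joined result plus its note, from state (cl, []), equals B's recursion with budget ml - cl
theorem pvLoopA_eq_render (ml : Int) (l : List (List (String × String))) (cl : Int) :
    PySem.Str.join "" (pvLoopA ml l cl []) ++ pvNote l (pvLoopA ml l cl []) = pvRender l (ml - cl) := by
  induction l generalizing cl with
  | nil => simp [pvLoopA, pvRender, pvNote, pvJoinNil]
  | cons a rest ih =>
    have hab : pvFmtB a = pvFmtA a := rfl
    simp only [pvLoopA, pvRender, hab]
    split_ifs with h1 h2 h2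
    · -- break: A keeps nothing, B emits the note for the whole list
      rw [pvJoinNil]
      simp only [pvNote, PySem.List.len_eq, List.length_cons, List.length_nil]
      have hc : ((rest.length + 1 : Nat) : Int) > ((0 : Nat) : Int) := by push_cast; omega
      rw [if_pos hc]
      simp
    · exact absurd h2 (by omega)
    · exact absurd h1 (by omega)
    · -- both take the head article
      rw [pvLoopA_acc]
      simp only [List.nil_append, List.singleton_append]
      rw [pvJoinCons, pvNote_cons, String.append_assoc]
      have harith : ml - cl - PySem.Str.len (pvFmtA a) = ml - (cl + PySem.Str.len (pvFmtA a)) := by ring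
      rw [harith, ← ih (cl + PySem.Str.len (pvFmtA a))]

-- ===== VERDICT (by name: the statement is the Claim_ definition above) =====
theorem format_articles_context_spec : Claim_equal_format_articles_context := by
  intro articles ml _
  unfold Spec_format_articles_context format_articles_context format_articles_context_alt
  by_cases he : articles = []
  · simp [he]
  · simp only [if_neg he]
    have h := pvLoopA_eq_render ml articles 0
    simp only [Int.sub_zero] at h
    rw [← h]
    unfold pvNote
    split_ifs with hc
    · rw [String.append_assoc]
    · simp
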